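-- pv_equiv track=rewrite | github.com/cwgong/phone_model_reg | phone_model_reg/struct_zgc_info.py | choose_max_camera
-- ===== SOURCE A (Python) =====
-- def choose_max_camera(camera_str):
--     int_list = []
--     camera_str_list = camera_str.split(",")
--     if len(camera_str_list) < 2:return camera_str
--     for camera_str in camera_str_list:
--         int_list.append(int(camera_str))
--     camera_max = max(int_list)
--     return str(camera_max)
-- ===== SOURCE B (Python) =====
-- def choose_max_camera(camera_str):
--     # single left-to-right character scan: tokenize on ',' while tracking the running max
--     if "," not in camera_str:
--         return camera_str
--     best = None
--     tok = ""
--     for ch in camera_str + ",":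
--         if ch == ",":
--             v = int(tok)
--             if best is None or v > best:
--                 best = v
--             tok = ""
--         else:
--             tok = tok + ch
--     return str(best)
-- ===== Notes on version B (the rewrite author's own statement) =====
-- stated objective: alternative
-- what changed: Replaces split-into-list, append-loop and max() with a single character-level scan that tokenizes on ',' in place and tracks the running maximum, never materialising the token list or the int list.
import Mathlib
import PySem

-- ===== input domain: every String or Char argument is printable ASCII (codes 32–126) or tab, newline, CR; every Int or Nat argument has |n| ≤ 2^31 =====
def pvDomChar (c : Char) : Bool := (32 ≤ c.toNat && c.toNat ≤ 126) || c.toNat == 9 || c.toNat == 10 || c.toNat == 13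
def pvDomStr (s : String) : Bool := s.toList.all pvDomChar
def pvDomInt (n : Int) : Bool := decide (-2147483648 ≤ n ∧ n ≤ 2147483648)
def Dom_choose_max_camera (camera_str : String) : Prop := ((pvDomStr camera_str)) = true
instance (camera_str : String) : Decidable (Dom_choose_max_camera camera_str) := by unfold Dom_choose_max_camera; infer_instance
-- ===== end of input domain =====

-- B replaces A's split-into-list + append-loop + max() with a single character scan that
-- tokenizes on ',' in place while tracking the running maximum (alternative decomposition).

-- ===== PORT A =====
def choose_max_camera (camera_str : String) : String :=
  let camera_str_list := (PySem.Str.split? camera_str ",").getD []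
  if camera_str_list.length < 2 then camera_str
  else
    -- 'for camera_str in camera_str_list: int_list.append(int(camera_str))'; int() raising ValueError is excluded by Pre_
    let int_list : List Int :=
      camera_str_list.foldl (fun acc t => acc ++ [(PySem.Int.ofStr? t).getD 0]) []
    let camera_max := (PySem.List.max? int_list (fun y => y)).getD 0
    PySem.Int.toStr camera_max

-- ===== PORT B =====
def choose_max_camera_alt (camera_str : String) : String :=
  if PySem.Str.isIn "," camera_str = false then camera_str
  else
    -- 'for ch in camera_str + ",": …' with state (best, tok); int() raising is excluded by Pre_
    let st := (camera_str.toList ++ [',']).foldl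
      (fun (st : Option Int × List Char) ch =>
        if ch = ',' then
          let v := (PySem.Int.ofChars? st.2).getD 0
          ((match st.1 with
            | none => some v
            | some b => if v > b then some v else some b), [])
        else (st.1, st.2 ++ [ch]))
      (none, [])
    PySem.Int.toStr (st.1.getD 0)

-- ===== PRECONDITION & SPEC =====
-- Pre_ excludes only inputs on which A raises ValueError: two or more comma-separated pieces where some piece is not int()-parsable (B raises there too).
def Pre_choose_max_camera (camera_str : String) : Prop :=
  let parts := (PySem.Str.split? camera_str ",").getD []
  parts.length < 2 ∨ parts.all (fun t => (PySem.Int.ofStr? t).isSome) = true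
instance (camera_str : String) : Decidable (Pre_choose_max_camera camera_str) := by unfold Pre_choose_max_camera; infer_instance
def pvWitness_choose_max_camera : String := "3,17,-5"
def Spec_choose_max_camera (camera_str : String) (out : String) : Prop := out = choose_max_camera_alt camera_str
instance (camera_str : String) (out : String) : Decidable (Spec_choose_max_camera camera_str out) := by unfold Spec_choose_max_camera; infer_instance

-- ===== CLAIM (what is proved, stated in full; the proofs are below) =====
def Claim_equal_choose_max_camera : Prop := ∀ (camera_str : String), Dom_choose_max_camera camera_str → Pre_choose_max_camera camera_str → Spec_choose_max_camera camera_str (choose_max_camera camera_str)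

-- ===== LEMMAS AND PROOFS =====

-- prepend a prefix onto the first piece (the tail-token accumulator of both tokenizers)
def pvPrep (p : List Char) : List (List Char) → List (List Char)
  | [] => [p]
  | h :: t => (p ++ h) :: t

-- reference tokenizer: split a char list on ','
def pvSplit : List Char → List (List Char)
  | [] => [[]]
  | c :: rest => if c = ',' then [] :: pvSplit rest else pvPrep [c] (pvSplit rest)

lemma pvSplit_ne_nil (cs : List Char) : pvSplit cs ≠ [] := by
  cases cs with
  | nil => simp [pvSplit]
  | cons c rest =>
    simp only [pvSplit]
    split_ifs
    · simp
    · cases h : pvSplit rest with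
      | nil => simp [pvPrep]
      | cons a t => simp [pvPrep]

lemma pvPrep_nil (ps : List (List Char)) (h : ps ≠ []) : pvPrep [] ps = ps := by
  cases ps with
  | nil => exact absurd rfl h
  | cons a t => simp [pvPrep]

lemma pvPrep_prep (a b : List Char) (ps : List (List Char)) :
    pvPrep a (pvPrep b ps) = pvPrep (a ++ b) ps := by
  cases ps <;> simp [pvPrep]

-- PySem's splitOn on the single-char separator [','] is the reference tokenizer
lemma go_eq_pvSplit : ∀ (fuel : Nat) (cs cur : List Char) (acc : List (List Char)),
    cs.length ≤ fuel →
    PySem.Chars.splitOn.go [','] fuel cs cur acc = acc.reverse ++ pvPrep cur.reverse (pvSplit cs) := by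
  intro fuel
  induction fuel with
  | zero =>
    intro cs cur acc h
    have : cs = [] := by cases cs <;> simp_all
    subst this
    simp [PySem.Chars.splitOn.go, pvSplit, pvPrep]
  | succ n ih =>
    intro cs cur acc h
    cases cs with
    | nil => simp [PySem.Chars.splitOn.go, pvSplit, pvPrep]
    | cons c rest =>
      by_cases hc : c = ','
      · subst hc
        have hpre : List.isPrefixOf [','] (',' :: rest) = true := by simp [List.isPrefixOf]
        simp only [PySem.Chars.splitOn.go, hpre, if_true, List.length_cons, List.length_nil,
          List.drop_succ_cons, List.drop_zero]
        rw [ih rest [] (cur.reverse :: acc) (by simpa using Nat.lt_succ_iff.mp (by simpa using h))]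
        rw [List.reverse_nil, pvPrep_nil _ (pvSplit_ne_nil rest)]
        simp [pvSplit, pvPrep]
      · have hpre : List.isPrefixOf [','] (c :: rest) = false := by
          simp [List.isPrefixOf]; exact fun hcc => absurd hcc.symm hc
        simp only [PySem.Chars.splitOn.go, hpre, Bool.false_eq_true, if_false]
        rw [ih rest (c :: cur) acc (by simpa using Nat.lt_succ_iff.mp (by simpa using h))]
        simp [pvSplit, hc, pvPrep_prep]

lemma splitOn_comma (cs : List Char) : PySem.Chars.splitOn cs [','] = pvSplit cs := by
  unfold PySem.Chars.splitOn
  rw [go_eq_pvSplit (cs.length + 1) cs [] [] (Nat.le_succ _)]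
  simpa using pvPrep_nil _ (pvSplit_ne_nil cs)

lemma two_le_split_iff_mem (cs : List Char) : 2 ≤ (pvSplit cs).length ↔ ',' ∈ cs := by
  induction cs with
  | nil => simp [pvSplit]
  | cons c rest ih =>
    by_cases hc : c = ','
    · subst hc
      have := pvSplit_ne_nil rest
      simp [pvSplit]
      cases h : pvSplit rest with
      | nil => exact absurd h this
      | cons a t => simp
    · have hne : ¬ (',' = c) := fun e => hc e.symm
      simp only [pvSplit, hc, if_false, List.mem_cons]
      cases h : pvSplit rest with
      | nil => exact absurd h (pvSplit_ne_nil rest)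
      | cons a t =>
        rw [h] at ih
        simp [pvPrep, hne, ← ih]

lemma singleton_infix_iff_mem (a : Char) (l : List Char) : [a] <:+: l ↔ a ∈ l := by
  constructor
  · rintro ⟨s, t, rfl⟩; simp
  · intro h
    obtain ⟨s, t, rfl⟩ := List.append_of_mem h
    exact ⟨s, t, by simp⟩

-- the value sides: running-max fold over pieces vs max? of the mapped list
def pvG (t : List Char) : Int := (PySem.Int.ofChars? t).getD 0

def pvBest (b : Option Int) (ts : List (List Char)) : Option Int :=
  ts.foldl (fun b t =>
    (match b with
      | none => some (pvG t)
      | some b0 => if pvG t > b0 then some (pvG t) else some b0)) b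

lemma pvBest_some (b : Int) (ts : List (List Char)) :
    pvBest (some b) ts = some ((ts.map pvG).foldl max b) := by
  induction ts generalizing b with
  | nil => simp [pvBest]
  | cons t tr ih =>
    simp only [pvBest, List.foldl_cons, List.map_cons]
    have : (if pvG t > b then some (pvG t) else some b) = some (max b (pvG t)) := by
      split_ifs <;> simp <;> omega
    rw [this]
    exact ih (max b (pvG t))

lemma pvBest_eq_max? (t0 : List Char) (tr : List (List Char)) :
    pvBest none (t0 :: tr) = PySem.List.max? ((t0 :: tr).map pvG) (fun y => y) := by
  simp only [List.map_cons, PySem.List.max?_id_cons]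
  show pvBest (some (pvG t0)) tr = _
  exact pvBest_some (pvG t0) tr

-- the scan in B's port, ended by the appended ',', computes pvBest over the pieces
lemma scan_eq : ∀ (cs : List Char) (b : Option Int) (tok : List Char),
    (cs ++ [',']).foldl
      (fun (st : Option Int × List Char) ch =>
        if ch = ',' then
          let v := (PySem.Int.ofChars? st.2).getD 0
          ((match st.1 with
            | none => some v
            | some b => if v > b then some v else some b), [])
        else (st.1, st.2 ++ [ch]))
      (b, tok)
    = (pvBest b (pvPrep tok (pvSplit cs)), []) := by
  intro cs
  induction cs with
  | nil =>
    intro b tok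
    simp [pvSplit, pvPrep, pvBest, pvG]
  | cons c rest ih =>
    intro b tok
    by_cases hc : c = ','
    · subst hc
      have hrw : pvPrep tok (pvSplit (',' :: rest)) = tok :: pvSplit rest := by
        simp [pvSplit, pvPrep]
      simp only [List.cons_append, List.foldl_cons, if_true]
      rw [ih]
      rw [pvPrep_nil _ (pvSplit_ne_nil rest), hrw]
      simp only [pvBest, List.foldl_cons]
      simp [pvG]
    · simp only [List.cons_append, List.foldl_cons, hc, if_false]
      rw [ih]
      simp [pvSplit, hc, pvPrep_prep]

-- ===== VERDICT (by name: the statement is the Claim_ definition above) =====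
theorem choose_max_camera_spec : Claim_equal_choose_max_camera := by
  intro s _ _
  unfold Spec_choose_max_camera choose_max_camera choose_max_camera_alt
  have hsplit : (PySem.Str.split? s ",").getD [] = (pvSplit s.toList).map String.ofList := by
    simp [PySem.Str.split?, PySem.Chars.split?, splitOn_comma]
  have hcomma : ("," : String).toList = [','] := by decide
  by_cases hmem : ',' ∈ s.toList
  · have hlen2 : 2 ≤ (pvSplit s.toList).length := (two_le_split_iff_mem s.toList).mpr hmem
    have htrue : PySem.Str.isIn "," s = true := by
      rw [PySem.Str.isIn_iff_infix, hcomma]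
      exact (singleton_infix_iff_mem ',' s.toList).mpr hmem
    rw [hsplit, if_neg (by rw [List.length_map]; omega), if_neg (by rw [htrue]; simp)]
    simp only [PySem.List.foldl_append_singleton_eq_map, List.nil_append, List.map_map]
    simp only [scan_eq]
    rw [pvPrep_nil _ (pvSplit_ne_nil s.toList)]
    have hmap : (pvSplit s.toList).map ((fun t => (PySem.Int.ofStr? t).getD 0) ∘ String.ofList)
        = (pvSplit s.toList).map pvG := by
      apply List.map_congr_left
      intro t _
      simp [PySem.Int.ofStr?, pvG]
    rw [hmap]
    obtain ⟨t0, tr, hts⟩ := List.exists_cons_of_ne_nil (pvSplit_ne_nil s.toList)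
    rw [hts, pvBest_eq_max?]
  · have hlt : (pvSplit s.toList).length < 2 := by
      by_contra h
      exact hmem ((two_le_split_iff_mem s.toList).mp (by omega))
    have hfalse : PySem.Str.isIn "," s = false := by
      rw [Bool.eq_false_iff, Ne, PySem.Str.isIn_iff_infix, hcomma]
      exact fun h => hmem ((singleton_infix_iff_mem ',' s.toList).mp h)
    rw [hsplit, if_pos (by rw [List.length_map]; omega), if_pos hfalse]
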